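-- pv_equiv track=rewrite | github.com/doxuansang/salary_analysis | matrix.py | matrix_A
-- ===== SOURCE A (Python) =====
-- def matrix1(m, n): # m là số dòng, n là số cột
--     kq = []
--     for i in range(m):
--         row = []
--         for j in range(n):
--             row.append(1)
--         kq.append(row)
--     return kq
--
-- def matrix_A(X1, X2, X3):
--     m = X1.__len__()  # Có bao nhiêu bộ dữ liệu
--     n = 3  # có bao nhiêu biến X
--     A = matrix1(m, n + 1)
--     for i in range(m):
--         A[i][1] = X1[i]
--         A[i][2] = X2[i]
--         A[i][3] = X3[i]
--     return A
-- ===== SOURCE B (Python) =====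
-- def matrix_A(X1, X2, X3):
--     return [[1, X1[i], X2[i], X3[i]] for i in range(len(X1))]
-- ===== Notes on version B (the rewrite author's own statement) =====
-- stated objective: simpler
-- what changed: B builds each row fully formed in a single pass over the indices, replacing A's two-pass allocate-an-all-ones-matrix-then-overwrite-three-columns scheme; writing each cell once instead of allocating then patching gives a constant-factor speedup.
import Mathlib
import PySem

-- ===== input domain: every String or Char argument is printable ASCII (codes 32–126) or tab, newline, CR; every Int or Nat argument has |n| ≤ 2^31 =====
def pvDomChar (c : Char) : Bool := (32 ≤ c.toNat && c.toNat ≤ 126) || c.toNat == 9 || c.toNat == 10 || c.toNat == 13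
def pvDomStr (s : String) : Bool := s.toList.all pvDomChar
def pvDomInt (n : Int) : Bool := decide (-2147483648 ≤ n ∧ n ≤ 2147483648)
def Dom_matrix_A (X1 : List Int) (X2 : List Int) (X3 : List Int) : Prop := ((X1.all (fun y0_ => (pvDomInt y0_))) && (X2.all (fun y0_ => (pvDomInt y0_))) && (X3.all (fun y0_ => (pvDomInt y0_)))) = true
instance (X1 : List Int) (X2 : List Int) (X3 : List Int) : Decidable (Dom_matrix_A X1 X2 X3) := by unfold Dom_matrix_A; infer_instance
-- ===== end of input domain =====

-- B replaces A's allocate-an-all-ones-matrix-then-overwrite-three-columns two-pass scheme with a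
-- single pass that emits each row fully formed (objective: simpler).

-- ===== PORT A =====
-- matrix1(m, n): m×n matrix of ones, built by nested append loops
def matrix1_port (m n : Int) : List (List Int) :=
  (PySem.List.pyRange 0 m 1).foldl
    (fun kq _i =>
      kq ++ [ (PySem.List.pyRange 0 n 1).foldl (fun row _j => row ++ [1]) [] ]) []

def matrix_A (X1 : List Int) (X2 : List Int) (X3 : List Int) : List (List Int) :=
  let m : Int := X1.length
  let A := matrix1_port m (3 + 1)
  (PySem.List.pyRange 0 m 1).foldl
    (fun A i =>
      -- A[i][1] = X1[i]; A[i][2] = X2[i]; A[i][3] = X3[i]  (in-place row mutation)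
      let row := PySem.List.pyGetD A i []
      let row := row.set 1 (PySem.List.pyGetD X1 i 0)
      let row := row.set 2 (PySem.List.pyGetD X2 i 0)
      let row := row.set 3 (PySem.List.pyGetD X3 i 0)
      A.set i.toNat row) A

-- ===== PORT B =====
def matrix_A_alt (X1 : List Int) (X2 : List Int) (X3 : List Int) : List (List Int) :=
  (PySem.List.pyRange 0 X1.length 1).map
    (fun i => [1, PySem.List.pyGetD X1 i 0, PySem.List.pyGetD X2 i 0, PySem.List.pyGetD X3 i 0])

-- ===== PRECONDITION & SPEC =====
-- Pre_ excludes exactly the inputs where the Python A (and B alike) raises IndexError: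
-- X2 or X3 shorter than X1.
def Pre_matrix_A (X1 : List Int) (X2 : List Int) (X3 : List Int) : Prop :=
  X1.length ≤ X2.length ∧ X1.length ≤ X3.length
instance (X1 : List Int) (X2 : List Int) (X3 : List Int) : Decidable (Pre_matrix_A X1 X2 X3) := by unfold Pre_matrix_A; infer_instance

def pvWitness_matrix_A : List Int × List Int × List Int := ([1, 2], [3, 4], [5, 6])

def Spec_matrix_A (X1 : List Int) (X2 : List Int) (X3 : List Int) (out : List (List Int)) : Prop := out = matrix_A_alt X1 X2 X3
instance (X1 : List Int) (X2 : List Int) (X3 : List Int) (out : List (List Int)) : Decidable (Spec_matrix_A X1 X2 X3 out) := by unfold Spec_matrix_A; infer_instance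

-- ===== CLAIM (what is proved, stated in full; the proofs are below) =====
def Claim_equal_matrix_A : Prop := ∀ (X1 : List Int) (X2 : List Int) (X3 : List Int), Dom_matrix_A X1 X2 X3 → Pre_matrix_A X1 X2 X3 → Spec_matrix_A X1 X2 X3 (matrix_A X1 X2 X3)

-- ===== LEMMAS AND PROOFS =====

-- the row A's inner updates produce from the all-ones row
def pvRowF (X1 X2 X3 : List Int) (j : Nat) : List Int :=
  [1, X1.getD j 0, X2.getD j 0, X3.getD j 0]

lemma matrix1_port_eq (m : Int) :
    matrix1_port m (3 + 1) = (PySem.List.pyRange 0 m 1).map (fun _ => ([1, 1, 1, 1] : List Int)) := by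
  unfold matrix1_port
  rw [PySem.List.foldl_append_singleton_eq_map]
  simp

lemma update_fold_eq (X1 X2 X3 : List Int) (n : Nat) (hn : n = X1.length) :
    ∀ k : Nat, k ≤ n →
      (PySem.List.pyRange 0 (k : Int) 1).foldl
        (fun A i =>
          let row := PySem.List.pyGetD A i []
          let row := row.set 1 (PySem.List.pyGetD X1 i 0)
          let row := row.set 2 (PySem.List.pyGetD X2 i 0)
          let row := row.set 3 (PySem.List.pyGetD X3 i 0)
          A.set i.toNat row)
        (List.replicate n ([1, 1, 1, 1] : List Int))
      = (List.range k).map (pvRowF X1 X2 X3) ++ List.replicate (n - k) ([1, 1, 1, 1] : List Int) := by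
  intro k
  induction k with
  | zero => intro _; simp [PySem.List.pyRange_one_eq_nil]
  | succ k ih =>
    intro hk
    have hk' : k ≤ n := Nat.le_of_succ_le hk
    push_cast
    rw [PySem.List.pyRange_one_succ_right (Int.natCast_nonneg k),
        List.foldl_append, ih hk']
    simp only [List.foldl_cons, List.foldl_nil]
    have hlen : ((List.range k).map (pvRowF X1 X2 X3)).length = k := by simp
    have hget : PySem.List.pyGetD
        ((List.range k).map (pvRowF X1 X2 X3) ++ List.replicate (n - k) ([1, 1, 1, 1] : List Int))
        (k : Int) [] = [1, 1, 1, 1] := by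
      rw [PySem.List.pyGetD_natCast]
      have hk2 : k < k + (n - k) := by omega
      simp [List.getD, hlen, show 0 < n - k by omega]
    rw [hget, Int.toNat_natCast, List.set_append_right _ _ (by rw [hlen])]
    have hrep : n - k = (n - (k + 1)) + 1 := by omega
    rw [hlen, Nat.sub_self, hrep, List.replicate_succ, List.set_cons_zero,
        List.range_succ, List.map_append]
    simp [pvRowF, List.set, PySem.List.pyGetD_natCast, List.append_assoc]

theorem matrix_A_spec : Claim_equal_matrix_A := by
  intro X1 X2 X3 _ _
  unfold Spec_matrix_A matrix_A matrix_A_alt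
  dsimp only
  rw [matrix1_port_eq]
  have hmap : (PySem.List.pyRange 0 (X1.length : Int) 1).map (fun _ => ([1, 1, 1, 1] : List Int))
      = List.replicate X1.length ([1, 1, 1, 1] : List Int) := by
    rw [List.eq_replicate_iff]
    constructor
    · simp [PySem.List.length_pyRange_one]
    · intro b hb
      simp only [List.mem_map] at hb
      obtain ⟨_, _, rfl⟩ := hb
      rfl
  have hlen : ((PySem.List.pyRange 0 (X1.length : Int) 1).map
      (fun _ => ([1, 1, 1, 1] : List Int))).length = X1.length := by
    simp [PySem.List.length_pyRange_one]
  rw [hmap]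
  rw [update_fold_eq X1 X2 X3 X1.length rfl X1.length (le_refl _)]
  rw [PySem.List.pyRange_one]
  simp [pvRowF, List.getD]
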